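-- pv_equiv track=rewrite | github.com/pedroporras/algoritmos | algoritmos/dosapuntadores/alien.py | check_words
-- ===== SOURCE A (Python) =====
-- def compute_word_weight(word, dictionary):
--     """Return the weight of a word."""
--     weight = 0
--     for letter in word:
--         if letter in dictionary:
--             weight += dictionary[letter]
--         else:
--             weight += 0
--
--     return weight
--
-- def check_words(words, alphabet):
--     """Return a list of words that appear in dictionary."""
--     result = []
--     dictionary = {letter: index for index, letter in enumerate(alphabet)}
--     for word in words:
--         word_weight = compute_word_weight(word, dictionary)
--         for other_word in words:
--             other_word_weight = compute_word_weight(other_word, dictionary)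
--             if word_weight > other_word_weight:
--                 return False
--
--     return True
-- ===== SOURCE B (Python) =====
-- def check_words(words, alphabet):
--     """Return True iff all words have the same letter-weight."""
--     index = {letter: i for i, letter in enumerate(alphabet)}
--     weights = {sum(index.get(ch, 0) for ch in word) for word in words}
--     return len(weights) <= 1
-- ===== Notes on version B (the rewrite author's own statement) =====
-- stated objective: faster
-- what changed: Replaced the nested pairwise comparison loops (recomputing every word's weight in the inner scan) with one pass that computes each weight once into a set, then checks the set has at most one element.
import Mathlib
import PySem

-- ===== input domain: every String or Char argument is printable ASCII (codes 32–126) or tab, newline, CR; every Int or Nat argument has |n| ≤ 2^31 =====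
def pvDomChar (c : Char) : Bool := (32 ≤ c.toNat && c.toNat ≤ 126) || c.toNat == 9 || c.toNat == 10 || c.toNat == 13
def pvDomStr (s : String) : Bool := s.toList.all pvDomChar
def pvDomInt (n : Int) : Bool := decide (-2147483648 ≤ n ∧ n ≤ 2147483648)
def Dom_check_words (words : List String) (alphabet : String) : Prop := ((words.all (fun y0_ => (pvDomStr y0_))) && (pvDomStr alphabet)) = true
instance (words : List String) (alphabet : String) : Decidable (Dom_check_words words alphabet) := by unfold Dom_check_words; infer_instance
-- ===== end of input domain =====

-- B replaces A's nested pairwise weight comparison with a single pass collecting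
-- each word's weight (computed once) into a set and checking its size ≤ 1 (faster: O(n·L) vs O(n²·L)).


-- ===== PORT A =====
-- dictionary = {letter: index for index, letter in enumerate(alphabet)}  (shared by both pythons verbatim)
def cwDict (alphabet : String) : PySem.Dict Char Int :=
  (PySem.List.enumerate alphabet.toList 0).foldl (fun d p => d.insert p.2 p.1) PySem.Dict.empty

def compute_word_weight (word : String) (dictionary : PySem.Dict Char Int) : Int :=
  word.toList.foldl
    (fun weight letter =>
      if dictionary.contains letter then weight + dictionary.getD letter 0 else weight + 0) 0

-- inner 'for other_word in words: … if word_weight > other_word_weight: return False'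
def cwInner (ww : Int) (dictionary : PySem.Dict Char Int) : List String → Bool
  | [] => true
  | other_word :: rest =>
    let other_word_weight := compute_word_weight other_word dictionary
    if ww > other_word_weight then false else cwInner ww dictionary rest

-- outer 'for word in words: …' (an inner False aborts the whole function)
def cwOuter (words : List String) (dictionary : PySem.Dict Char Int) : List String → Bool
  | [] => true
  | word :: rest =>
    let word_weight := compute_word_weight word dictionary
    if cwInner word_weight dictionary words then cwOuter words dictionary rest else false

def check_words (words : List String) (alphabet : String) : Bool :=
  let dictionary := cwDict alphabet
  cwOuter words dictionary words

-- ===== PORT B =====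
-- sum(index.get(ch, 0) for ch in word)
def cwAltWeight (index : PySem.Dict Char Int) (word : String) : Int :=
  word.toList.foldl (fun a ch => a + index.getD ch 0) 0

def check_words_alt (words : List String) (alphabet : String) : Bool :=
  let index := cwDict alphabet
  let weights := PySem.Set.ofList (words.map (cwAltWeight index))
  decide (weights.length ≤ 1)

-- ===== PRECONDITION & SPEC =====
def Spec_check_words (words : List String) (alphabet : String) (out : Bool) : Prop := out = check_words_alt words alphabet
instance (words : List String) (alphabet : String) (out : Bool) : Decidable (Spec_check_words words alphabet out) := by unfold Spec_check_words; infer_instance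

-- ===== CLAIM (what is proved, stated in full; the proofs are below) =====
def Claim_equal_check_words : Prop := ∀ (words : List String) (alphabet : String), Dom_check_words words alphabet → Spec_check_words words alphabet (check_words words alphabet)

-- ===== LEMMAS AND PROOFS =====

theorem cw_weight_eq (d : PySem.Dict Char Int) (w : String) :
    compute_word_weight w d = cwAltWeight d w := by
  unfold compute_word_weight cwAltWeight
  apply PySem.List.foldl_congr_mem
  intro a c _
  cases h : d.contains c with
  | true => simp
  | false => rw [PySem.Dict.getD_of_not_contains (h := h)]; simp

theorem cwInner_true_iff (ww : Int) (d : PySem.Dict Char Int) (l : List String) :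
    cwInner ww d l = true ↔ ∀ o ∈ l, ww ≤ compute_word_weight o d := by
  induction l with
  | nil => simp [cwInner]
  | cons o rest ih =>
    simp only [cwInner, List.mem_cons]
    split_ifs with h
    · simp; omega
    · constructor
      · intro h1 a ha
        rcases ha with rfl | ha
        · omega
        · exact (ih.mp h1) a ha
      · intro h1; exact ih.mpr (fun a ha => h1 a (Or.inr ha))

theorem cwOuter_true_iff (words : List String) (d : PySem.Dict Char Int) (l : List String) :
    cwOuter words d l = true ↔
      ∀ w ∈ l, ∀ o ∈ words, compute_word_weight w d ≤ compute_word_weight o d := by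
  induction l with
  | nil => simp [cwOuter]
  | cons w rest ih =>
    simp only [cwOuter, List.mem_cons]
    split_ifs with h
    · rw [ih]
      constructor
      · intro h1 a ha o ho
        rcases ha with rfl | ha
        · exact (cwInner_true_iff _ _ _).mp h o ho
        · exact h1 a ha o ho
      · intro h1 a ha o ho; exact h1 a (Or.inr ha) o ho
    · simp only [false_iff]
      intro h1
      exact h ((cwInner_true_iff _ _ _).mpr (h1 w (Or.inl rfl)))

theorem nodup_all_eq_len_le_one {α : Type} {l : List α} (hn : l.Nodup) {x : α}
    (h : ∀ a ∈ l, a = x) : l.length ≤ 1 := by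
  match l with
  | [] => simp
  | [a] => simp
  | a :: b :: t =>
    exfalso
    have ha := h a (by simp)
    have hb := h b (by simp)
    subst ha
    simp [hb] at hn

theorem ofList_len_le_one_iff {α : Type} [DecidableEq α] (xs : List α) :
    (PySem.Set.ofList xs).length ≤ 1 ↔ ∀ a ∈ xs, ∀ b ∈ xs, a = b := by
  constructor
  · intro h a ha b hb
    have ha' : a ∈ PySem.Set.ofList xs := (PySem.Set.mem_ofList _ _).mpr ha
    have hb' : b ∈ PySem.Set.ofList xs := (PySem.Set.mem_ofList _ _).mpr hb
    match hs : PySem.Set.ofList xs with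
    | [] => rw [hs] at ha'; simp at ha'
    | [x] =>
      rw [hs] at ha' hb'; simp at ha' hb'; rw [ha', hb']
    | x :: y :: t => rw [hs] at h; simp at h
  · intro h
    match xs with
    | [] => simp [PySem.Set.ofList]
    | x :: t =>
      apply nodup_all_eq_len_le_one (PySem.Set.nodup_ofList _) (x := x)
      intro a ha
      exact h a ((PySem.Set.mem_ofList _ _).mp ha) x (by simp)

theorem all_le_iff_map_eq (words : List String) (d : PySem.Dict Char Int) :
    (∀ w ∈ words, ∀ o ∈ words, compute_word_weight w d ≤ compute_word_weight o d) ↔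
      (∀ a ∈ words.map (cwAltWeight d), ∀ b ∈ words.map (cwAltWeight d), a = b) := by
  simp only [List.mem_map]
  constructor
  · rintro h a ⟨w, hw, rfl⟩ b ⟨o, ho, rfl⟩
    rw [← cw_weight_eq, ← cw_weight_eq]
    exact le_antisymm (h w hw o ho) (h o ho w hw)
  · intro h w hw o ho
    rw [cw_weight_eq, cw_weight_eq]
    exact le_of_eq (h _ ⟨w, hw, rfl⟩ _ ⟨o, ho, rfl⟩)

-- ===== VERDICT (by name: the statement is the Claim_ definition above) =====
theorem check_words_spec : Claim_equal_check_words := by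
  intro words alphabet _
  unfold Spec_check_words check_words check_words_alt
  rw [Bool.eq_iff_iff, cwOuter_true_iff, decide_eq_true_eq,
    ofList_len_le_one_iff, all_le_iff_map_eq]
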